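-- pv_equiv track=rewrite | github.com/leogentleman/olog | ologdecoder/PluginForOLog.py | match_log_level
-- ===== SOURCE A (Python) =====
-- def match_log_level(logLvl, lvl):
-- 	if len(logLvl) != 2: return False
--
-- 	lvls = ['v', 'd', 'i', 'w', 'e']
-- 	findLvl = False
-- 	curLvl = logLvl[1].lower()
-- 	for lvlItem in lvls:
-- 		if lvlItem == lvl: findLvl = True
-- 		if findLvl and curLvl == lvlItem:
-- 			return True
--
-- 	return False
-- ===== SOURCE B (Python) =====
-- def match_log_level(logLvl, lvl):
-- 	if len(logLvl) != 2:
-- 		return False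
-- 	lvls = ['v', 'd', 'i', 'w', 'e']
-- 	cur = logLvl[1].lower()
-- 	if lvl in lvls and cur in lvls:
-- 		return lvls.index(cur) >= lvls.index(lvl)
-- 	return False
-- ===== Notes on version B (the rewrite author's own statement) =====
-- stated objective: simpler
-- what changed: Replaces A's stateful scan (a findLvl flag set when lvl is reached, then checked together with the current level inside the same loop) with a closed-form positional comparison: guard membership of both levels and compare lvls.index(cur) >= lvls.index(lvl).
import Mathlib
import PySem

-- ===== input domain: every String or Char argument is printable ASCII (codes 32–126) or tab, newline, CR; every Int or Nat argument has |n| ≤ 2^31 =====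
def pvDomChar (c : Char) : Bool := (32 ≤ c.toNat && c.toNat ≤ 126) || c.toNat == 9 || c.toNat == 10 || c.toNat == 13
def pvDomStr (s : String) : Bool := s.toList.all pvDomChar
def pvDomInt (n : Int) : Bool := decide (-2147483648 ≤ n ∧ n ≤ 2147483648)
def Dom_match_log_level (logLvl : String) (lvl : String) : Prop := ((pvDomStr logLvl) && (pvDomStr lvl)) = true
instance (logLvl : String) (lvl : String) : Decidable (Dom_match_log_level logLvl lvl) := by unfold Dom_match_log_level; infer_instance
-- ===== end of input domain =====

-- B replaces A's stateful find-then-compare scan by a direct positional comparison of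
-- the two levels' indices (objective: simpler); return values proved equal everywhere.

-- ===== PORT A =====
-- the for-loop: carries the findLvl flag, early-returns true
def mllLoopA : List Char → Bool → Char → List Char → Bool
  | [], _, _, _ => false
  | x :: rest, findLvl, cur, lvlCs =>
    let findLvl := if lvlCs == [x] then true else findLvl
    if findLvl && cur == x then true else mllLoopA rest findLvl cur lvlCs

def match_log_level (logLvl : String) (lvl : String) : Bool :=
  if PySem.Str.len logLvl != 2 then false
  else
    match PySem.Str.pyGet? logLvl 1 with
    | none => false  -- unreachable: len = 2
    | some c => mllLoopA ['v', 'd', 'i', 'w', 'e'] false (PySem.Chars.lowerChar c) lvl.toList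

-- ===== PORT B =====
def match_log_level_alt (logLvl : String) (lvl : String) : Bool :=
  if PySem.Str.len logLvl != 2 then false
  else
    match PySem.Str.pyGet? logLvl 1 with
    | none => false  -- unreachable: len = 2
    | some c =>
      let lvls : List Char := ['v', 'd', 'i', 'w', 'e']
      let cur := PySem.Chars.lowerChar c
      -- 'lvl in lvls': lvl equals a one-char string whose char is in lvls
      match lvl.toList with
      | [l] =>
        match PySem.List.index? lvls l, PySem.List.index? lvls cur with
        | some jl, some jc => decide (jl ≤ jc)
        | _, _ => false
      | _ => false

-- ===== PRECONDITION & SPEC =====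
def Spec_match_log_level (logLvl : String) (lvl : String) (out : Bool) : Prop := out = match_log_level_alt logLvl lvl
instance (logLvl : String) (lvl : String) (out : Bool) : Decidable (Spec_match_log_level logLvl lvl out) := by unfold Spec_match_log_level; infer_instance

-- ===== CLAIM (what is proved, stated in full; the proofs are below) =====
def Claim_equal_match_log_level : Prop := ∀ (logLvl : String) (lvl : String), Dom_match_log_level logLvl lvl → Spec_match_log_level logLvl lvl (match_log_level logLvl lvl)

-- ===== LEMMAS AND PROOFS =====

lemma mll_char_cases (c : Char) :
    c = 'v' ∨ c = 'd' ∨ c = 'i' ∨ c = 'w' ∨ c = 'e' ∨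
      (c ≠ 'v' ∧ c ≠ 'd' ∧ c ≠ 'i' ∧ c ≠ 'w' ∧ c ≠ 'e') := by
  by_cases h1 : c = 'v' <;> by_cases h2 : c = 'd' <;> by_cases h3 : c = 'i' <;>
    by_cases h4 : c = 'w' <;> by_cases h5 : c = 'e' <;> tauto

-- the core equality: A's scan equals B's index comparison, for any cur char and lvl chars
lemma mll_core (cur : Char) (lvlCs : List Char) :
    mllLoopA ['v', 'd', 'i', 'w', 'e'] false cur lvlCs =
      (match lvlCs with
       | [l] =>
         match PySem.List.index? ['v', 'd', 'i', 'w', 'e'] l,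
               PySem.List.index? ['v', 'd', 'i', 'w', 'e'] cur with
         | some jl, some jc => decide (jl ≤ jc)
         | _, _ => false
       | _ => false) := by
  match lvlCs with
  | [] => simp [mllLoopA]
  | l1 :: l2 :: rest => simp [mllLoopA]
  | [l] =>
    rcases mll_char_cases l with hl | hl | hl | hl | hl | ⟨h1, h2, h3, h4, h5⟩ <;>
      rcases mll_char_cases cur with hc | hc | hc | hc | hc | ⟨g1, g2, g3, g4, g5⟩ <;>
        simp_all [mllLoopA, PySem.List.index?, List.idxOf?, List.findIdx?, List.findIdx?.go, beq_iff_eq, @eq_comm Char]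

theorem match_log_level_eq_alt (logLvl lvl : String) :
    match_log_level logLvl lvl = match_log_level_alt logLvl lvl := by
  unfold match_log_level match_log_level_alt
  split
  · rfl
  · cases h : PySem.Str.pyGet? logLvl 1 with
    | none => rfl
    | some c => exact mll_core (PySem.Chars.lowerChar c) lvl.toList

-- ===== VERDICT (by name: the statement is the Claim_ definition above) =====
theorem match_log_level_spec : Claim_equal_match_log_level := by
  intro logLvl lvl _
  exact match_log_level_eq_alt logLvl lvl
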